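-- pv_equiv track=rewrite | github.com/pqnguyen/CompetitiveProgramming | practice/OperationOnMatrix.py | snake_matrix
-- ===== SOURCE A (Python) =====
-- def snake_matrix(matrix):
--     res = []
--     if not matrix: return res
--     n, m = len(matrix), len(matrix[0])
--     for i in range(n):
--         for j in range(m):
--             col = m - j - 1 if i % 2 else j
--             res.append(matrix[i][col])
--
--     return res
-- ===== SOURCE B (Python) =====
-- def snake_matrix(matrix):
--     if not matrix:
--         return []
--     m = len(matrix[0])
--     out = []
--     for i, row in enumerate(matrix):
--         chunk = row[:m]
--         out.extend(chunk if i % 2 == 0 else chunk[::-1])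
--     return out
-- ===== Notes on version B (the rewrite author's own statement) =====
-- stated objective: simpler
-- what changed: Replaces the nested column-index loops with a single pass over the rows: each row contributes its first-m-element chunk as-is (even row) or reversed (odd row); bulk slice/extend replaces per-element index arithmetic and append, a constant-factor speedup.
import Mathlib
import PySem

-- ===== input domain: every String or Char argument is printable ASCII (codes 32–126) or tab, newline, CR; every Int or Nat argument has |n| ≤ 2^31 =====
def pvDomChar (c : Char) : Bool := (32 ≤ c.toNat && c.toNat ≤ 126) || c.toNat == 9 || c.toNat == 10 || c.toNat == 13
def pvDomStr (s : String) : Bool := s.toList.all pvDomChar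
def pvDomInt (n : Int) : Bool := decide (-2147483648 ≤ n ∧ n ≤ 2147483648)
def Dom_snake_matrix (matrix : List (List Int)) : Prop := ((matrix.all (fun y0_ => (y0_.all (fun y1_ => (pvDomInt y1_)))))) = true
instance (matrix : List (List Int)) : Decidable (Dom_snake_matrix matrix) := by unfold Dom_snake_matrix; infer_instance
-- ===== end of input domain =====

-- B replaces A's nested column-index loops by one pass over rows (even row: chunk as-is,
-- odd row: chunk reversed); objective: simpler.

-- ===== PORT A =====
def snake_matrix (matrix : List (List Int)) : List Int :=
  if matrix = [] then []
  else
    let n : Int := matrix.length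
    let m : Int := (matrix.headD []).length
    (PySem.List.pyRange 0 n 1).foldl (fun res i =>
      (PySem.List.pyRange 0 m 1).foldl (fun res j =>
        let col : Int := if i % 2 ≠ 0 then m - j - 1 else j
        res ++ [PySem.List.pyGetD (PySem.List.pyGetD matrix i []) col 0]) res) []

-- ===== PORT B =====
def snake_matrix_alt (matrix : List (List Int)) : List Int :=
  match matrix with
  | [] => []
  | r0 :: _ =>
    let m : Int := r0.length
    (PySem.List.enumerate matrix 0).foldl (fun out p =>
      let chunk := PySem.List.slice p.2 none (some m)   -- row[:m]
      out ++ (if p.1 % 2 = 0 then chunk else chunk.reverse)) []  -- chunk[::-1] = reverse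

-- ===== PRECONDITION & SPEC =====
-- Pre_ excludes exactly the inputs on which A raises IndexError: some row shorter than the first row.
def Pre_snake_matrix (matrix : List (List Int)) : Prop :=
  ∀ r ∈ matrix, (matrix.headD []).length ≤ r.length
instance (matrix : List (List Int)) : Decidable (Pre_snake_matrix matrix) := by
  unfold Pre_snake_matrix; infer_instance
def pvWitness_snake_matrix : List (List Int) := [[1, 2], [3, 4], [5, 6]]

def Spec_snake_matrix (matrix : List (List Int)) (out : List Int) : Prop := out = snake_matrix_alt matrix
instance (matrix : List (List Int)) (out : List Int) : Decidable (Spec_snake_matrix matrix out) := by unfold Spec_snake_matrix; infer_instance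

-- ===== CLAIM (what is proved, stated in full; the proofs are below) =====
def Claim_equal_snake_matrix : Prop := ∀ (matrix : List (List Int)), Dom_snake_matrix matrix → Pre_snake_matrix matrix → Spec_snake_matrix matrix (snake_matrix matrix)

-- ===== LEMMAS AND PROOFS =====

-- common reference recursion: snake order with row index i and width m
def snakeGo (m : Nat) (i : Nat) (rows : List (List Int)) : List Int :=
  match rows with
  | [] => []
  | r :: rs => (if i % 2 = 0 then r.take m else (r.take m).reverse) ++ snakeGo m (i + 1) rs

lemma map_range_getD_eq_take (row : List Int) (m : Nat) (h : m ≤ row.length) :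
    (List.range m).map (fun k => row.getD k 0) = row.take m := by
  apply List.ext_getElem
  · simp [h]
  · intro i h1 h2
    simp at h1
    simp [List.getD_eq_getElem?_getD, List.getElem?_eq_getElem (by omega : i < row.length)]

lemma map_range_getD_rev_eq (row : List Int) (m : Nat) (h : m ≤ row.length) :
    (List.range m).map (fun k => row.getD (m - 1 - k) 0) = (row.take m).reverse := by
  apply List.ext_getElem
  · simp [h]
  · intro i h1 h2
    simp at h1
    have hlt : m - 1 - i < row.length := by omega
    simp [List.getD_eq_getElem?_getD, List.getElem?_eq_getElem hlt, Nat.min_eq_left h]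

-- A's inner loop over j equals the chunk (possibly reversed) appended to res
lemma inner_loop (row : List Int) (m : Nat) (i : Int) (res : List Int) (h : m ≤ row.length) :
    (PySem.List.pyRange 0 (m : Int) 1).foldl (fun res j =>
        res ++ [PySem.List.pyGetD row (if i % 2 ≠ 0 then (m : Int) - j - 1 else j) 0]) res
      = res ++ (if i % 2 = 0 then row.take m else (row.take m).reverse) := by
  rw [PySem.List.foldl_append_singleton_eq_map]
  by_cases hp : i % 2 = 0
  · simp only [hp, ne_eq, not_true_eq_false, if_false]
    congr 1
    rw [PySem.List.pyRange_one]
    simp only [List.map_map]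
    rw [← map_range_getD_eq_take row m h]
    apply List.map_congr_left
    intro k hk
    simp at hk ⊢
  · simp only [hp, ne_eq, ite_not]
    congr 1
    rw [PySem.List.pyRange_one]
    simp only [List.map_map]
    rw [← map_range_getD_rev_eq row m h]
    apply List.map_congr_left
    intro k hk
    simp only [List.mem_range] at hk
    have hkm : k < m := by omega
    simp only [Function.comp, zero_add]
    rw [show (m : Int) - (k : Int) - 1 = ((m - 1 - k : Nat) : Int) from by omega]
    simp [List.getD_eq_getElem?_getD]

-- A's outer loop over a suffix of rows equals acc ++ snakeGo
lemma A_outer (full : List (List Int)) (m : Nat)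
    (hm : ∀ r ∈ full, m ≤ r.length) :
    ∀ (k : Nat) (acc : List Int), k ≤ full.length →
    (PySem.List.pyRange (k : Int) (full.length : Int) 1).foldl (fun res i =>
      (PySem.List.pyRange 0 (m : Int) 1).foldl (fun res j =>
        res ++ [PySem.List.pyGetD (PySem.List.pyGetD full i []) (if i % 2 ≠ 0 then (m : Int) - j - 1 else j) 0]) res) acc
      = acc ++ snakeGo m k (full.drop k) := by
  intro k
  induction hn : full.length - k generalizing k with
  | zero =>
    intro acc hk
    have hk' : k = full.length := by omega
    subst hk'
    rw [show PySem.List.pyRange ((full.length : Nat) : Int) ((full.length : Nat) : Int) 1 = []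
          from PySem.List.pyRange_one_eq_nil le_rfl]
    simp [snakeGo]
  | succ d ih =>
    intro acc hk
    have hklt : k < full.length := by omega
    rw [show PySem.List.pyRange (k : Int) ((full.length : Nat) : Int) 1
          = (k : Int) :: PySem.List.pyRange ((k : Int) + 1) ((full.length : Nat) : Int) 1
          from PySem.List.pyRange_one_cons (by exact_mod_cast hklt)]
    simp only [List.foldl_cons]
    have hrow : PySem.List.pyGetD full (k : Int) [] = full[k] := by
      rw [PySem.List.pyGetD_natCast]
      simp [List.getD_eq_getElem?_getD, List.getElem?_eq_getElem hklt]
    rw [hrow, inner_loop _ m _ _ (hm _ (List.getElem_mem hklt))]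
    have : ((k : Int) + 1) = ((k + 1 : Nat) : Int) := by push_cast; ring
    rw [this, ih (k + 1) (by omega) _ (by omega)]
    have hdrop : full.drop k = full[k] :: full.drop (k + 1) :=
      List.drop_eq_getElem_cons hklt
    rw [hdrop]
    simp only [snakeGo, List.append_assoc]
    congr 2
    have : ((k : Int)) % 2 = 0 ↔ k % 2 = 0 := by omega
    by_cases hp : k % 2 = 0 <;> simp [hp, this]

-- B's enumerate loop equals acc ++ snakeGo
lemma B_loop (m : Nat) :
    ∀ (rows : List (List Int)) (i : Nat) (acc : List Int),
    (PySem.List.enumerate rows (i : Int)).foldl (fun out p =>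
        out ++ (if p.1 % 2 = 0 then PySem.List.slice p.2 none (some (m : Int))
                else (PySem.List.slice p.2 none (some (m : Int))).reverse)) acc
      = acc ++ snakeGo m i rows := by
  intro rows
  induction rows with
  | nil => intro i acc; simp [PySem.List.enumerate, snakeGo]
  | cons r rs ih =>
    intro i acc
    rw [PySem.List.enumerate_cons]
    simp only [List.foldl_cons]
    have : ((i : Int) + 1) = ((i + 1 : Nat) : Int) := by push_cast; ring
    rw [this, ih (i + 1)]
    rw [PySem.List.slice_to_natCast]
    have hp : ((i : Int)) % 2 = 0 ↔ i % 2 = 0 := by omega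
    simp only [snakeGo, List.append_assoc]
    congr 2
    by_cases h : i % 2 = 0 <;> simp [h, hp]

-- ===== VERDICT (by name: the statement is the Claim_ definition above) =====
theorem snake_matrix_spec : Claim_equal_snake_matrix := by
  intro matrix _ hpre
  unfold Spec_snake_matrix
  cases matrix with
  | nil => rfl
  | cons r0 rs =>
    unfold snake_matrix snake_matrix_alt
    simp only [if_neg (by simp : ¬ (r0 :: rs = []))]
    have hm : ∀ r ∈ r0 :: rs, r0.length ≤ r.length := by
      intro r hr; simpa using hpre r hr
    have hA := A_outer (r0 :: rs) r0.length hm 0 [] (by omega)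
    have hB := B_loop r0.length (r0 :: rs) 0 []
    simp only [Nat.cast_zero, List.drop_zero, List.nil_append] at hA hB
    rw [show ((r0 :: rs).headD []).length = r0.length from rfl]
    rw [hA, hB]
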